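-- pv_equiv track=rewrite | github.com/maxchanhi/music-theory-app | note_story/test_3.py | three_notename
-- ===== SOURCE A (Python) =====
-- note_name = 'abcdefg'
--
-- def three_notename(word=str):
--     note_count = 0
--     start_idx = -1
--     for i, letter in enumerate(word):
--         if letter in note_name:
--             if start_idx == -1:
--                 start_idx = i
--             note_count += 1
--             if note_count >= 3:
--                 return True, start_idx
--         else:
--             if note_count >= 3:
--                 return True, start_idx
--             note_count = 0
--             start_idx = -1
--     return False, None
-- ===== SOURCE B (Python) =====
-- note_name = 'abcdefg'
--
-- def three_notename(word=str):
--     # sliding window: check each length-3 window directly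
--     for i in range(len(word) - 2):
--         if all(c in note_name for c in word[i:i+3]):
--             return True, i
--     return False, None
-- ===== Notes on version B (the rewrite author's own statement) =====
-- stated objective: simpler
-- what changed: Replaced the running note_count/start_idx state machine with a direct fixed-size sliding-window scan that returns the first index whose length-3 window is all note letters.
import Mathlib
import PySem

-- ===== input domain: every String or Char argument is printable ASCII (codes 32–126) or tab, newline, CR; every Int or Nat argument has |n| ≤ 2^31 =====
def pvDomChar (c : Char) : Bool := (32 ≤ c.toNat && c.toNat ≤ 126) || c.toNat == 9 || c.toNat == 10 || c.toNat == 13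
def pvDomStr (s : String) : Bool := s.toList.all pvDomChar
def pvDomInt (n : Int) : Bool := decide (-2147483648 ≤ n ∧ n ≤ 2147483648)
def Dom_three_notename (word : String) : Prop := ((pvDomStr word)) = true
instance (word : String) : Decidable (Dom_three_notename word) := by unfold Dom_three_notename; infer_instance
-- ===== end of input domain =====

-- B replaces A's running note_count/start_idx state machine by a direct length-3 sliding-window scan (simpler decomposition, same cost).

-- ===== PORT A =====
-- 'letter in note_name' for the one-char letter = membership in "abcdefg"
def pvNote (c : Char) : Bool := ("abcdefg".toList).contains c

-- the for-loop of A over (i, letter), carrying note_count and start_idx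
def pvAAux : List Char → Int → Int → Int → Bool × Option Int
  | [], _, _, _ => (false, none)
  | c :: rest, i, cnt, start =>
    if pvNote c then
      let start' := if start = -1 then i else start
      let cnt' := cnt + 1
      if cnt' ≥ 3 then (true, some start')
      else pvAAux rest (i + 1) cnt' start'
    else
      if cnt ≥ 3 then (true, some start)
      else pvAAux rest (i + 1) 0 (-1)

def three_notename (word : String) : Bool × Option Int :=
  pvAAux word.toList 0 0 (-1)

-- ===== PORT B =====
-- B's loop: for each window start i, test the three chars word[i:i+3]
def pvBAux : List Char → Int → Bool × Option Int
  | a :: b :: c :: rest, i =>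
    if pvNote a && pvNote b && pvNote c then (true, some i)
    else pvBAux (b :: c :: rest) (i + 1)
  | _, _ => (false, none)

def three_notename_alt (word : String) : Bool × Option Int :=
  pvBAux word.toList 0

-- ===== PRECONDITION & SPEC =====
def Spec_three_notename (word : String) (out : Bool × Option Int) : Prop := out = three_notename_alt word
instance (word : String) (out : Bool × Option Int) : Decidable (Spec_three_notename word out) := by unfold Spec_three_notename; infer_instance

-- ===== CLAIM (what is proved, stated in full; the proofs are below) =====
def Claim_equal_three_notename : Prop := ∀ (word : String), Dom_three_notename word → Spec_three_notename word (three_notename word)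

-- ===== LEMMAS AND PROOFS =====

-- joint invariant: A's (cnt, start) state encodes the cnt already-seen note chars before position i
lemma pvKey (cs : List Char) :
    (∀ i : Int, 0 ≤ i → pvAAux cs i 0 (-1) = pvBAux cs i) ∧
    (∀ i : Int, 1 ≤ i → ∀ a : Char, pvNote a = true →
      pvAAux cs i 1 (i - 1) = pvBAux (a :: cs) (i - 1)) ∧
    (∀ i : Int, 2 ≤ i → ∀ a b : Char, pvNote a = true → pvNote b = true →
      pvAAux cs i 2 (i - 2) = pvBAux (a :: b :: cs) (i - 2)) := by
  induction cs with
  | nil =>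
    refine ⟨fun i _ => rfl, fun i _ a _ => ?_, fun i _ a b _ _ => ?_⟩
    · simp [pvAAux, pvBAux]
    · simp [pvAAux, pvBAux]
  | cons c rest ih =>
    obtain ⟨ih0, ih1, ih2⟩ := ih
    refine ⟨fun i hi => ?_, fun i hi a ha => ?_, fun i hi a b ha hb => ?_⟩
    · by_cases hc : pvNote c = true
      · -- first note: A moves to state (1, i); B keeps scanning from i
        have h1 := ih1 (i + 1) (by omega) c hc
        have e : i + 1 - 1 = i := by ring
        rw [e] at h1
        simp only [pvAAux, hc, if_true]
        norm_num
        exact h1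
      · -- not a note: both skip c
        have hc' : pvNote c = false := by simpa using hc
        have h0 := ih0 (i + 1) (by omega)
        simp only [pvAAux, hc', Bool.false_eq_true, if_false]
        norm_num
        rw [h0]
        match rest with
        | [] => simp [pvBAux]
        | [d] => simp [pvBAux]
        | d :: e :: rest3 => simp [pvBAux, hc']
    · by_cases hc : pvNote c = true
      · have h2 := ih2 (i + 1) (by omega) a c ha hc
        have e : i + 1 - 2 = i - 1 := by ring
        rw [e] at h2
        have hne : ¬ (i - 1 = -1) := by omega
        simp only [pvAAux, hc, if_true, if_neg hne]
        norm_num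
        exact h2
      · have hc' : pvNote c = false := by simpa using hc
        have h0 := ih0 (i + 1) (by omega)
        simp only [pvAAux, hc', Bool.false_eq_true, if_false]
        norm_num
        rw [h0]
        match rest with
        | [] => simp [pvBAux]
        | [d] => simp [pvBAux, hc']
        | d :: e :: rest3 =>
          have e1 : i - 1 + 1 + 1 = i + 1 := by ring
          simp only [pvBAux, ha, hc', Bool.and_eq_true, Bool.false_eq_true, and_false,
            false_and, if_false, e1]
    · by_cases hc : pvNote c = true
      · have hne : ¬ (i - 2 = -1) := by omega
        simp [pvAAux, hc, if_neg hne, pvBAux, ha, hb]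
      · have hc' : pvNote c = false := by simpa using hc
        have h0 := ih0 (i + 1) (by omega)
        simp only [pvAAux, hc', Bool.false_eq_true, if_false]
        norm_num
        rw [h0]
        have e1 : i - 2 + 1 + 1 + 1 = i + 1 := by ring
        match rest with
        | [] => simp [pvBAux, hc']
        | [d] => simp [pvBAux, hc']
        | d :: e :: rest3 => simp [pvBAux, hc', e1]

-- ===== VERDICT (by name: the statement is the Claim_ definition above) =====
theorem three_notename_spec : Claim_equal_three_notename := by
  intro word _
  unfold Spec_three_notename three_notename three_notename_alt
  exact (pvKey word.toList).1 0 le_rfl
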